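-- pv_equiv track=rewrite | github.com/alexandraback/datacollection | solutions_5648941810974720_0/Python/Mattj/a.py | rem
-- ===== SOURCE A (Python) =====
-- def rem(s,d):
--     for c in d:
--         i = s.find(c)
--         if i>=0:
--             s = s[:i] + s[i+1:]
--         else:
--             return None
--     return s
-- ===== SOURCE B (Python) =====
-- def rem(s, d):
--     # Count required removals per char once, then delete in a single pass over s.
--     need = {}
--     for c in d:
--         need[c] = need.get(c, 0) + 1
--     out = []
--     for ch in s:
--         if need.get(ch, 0) > 0:
--             need[ch] = need[ch] - 1
--         else:
--             out.append(ch)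
--     if any(v > 0 for v in need.values()):
--         return None
--     return ''.join(out)
-- ===== Notes on version B (the rewrite author's own statement) =====
-- stated objective: faster
-- what changed: Replaced A's per-char-of-d find-and-slice loop over s with a counter of d's characters and a single deletion pass over s followed by a leftover check.
import Mathlib
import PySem

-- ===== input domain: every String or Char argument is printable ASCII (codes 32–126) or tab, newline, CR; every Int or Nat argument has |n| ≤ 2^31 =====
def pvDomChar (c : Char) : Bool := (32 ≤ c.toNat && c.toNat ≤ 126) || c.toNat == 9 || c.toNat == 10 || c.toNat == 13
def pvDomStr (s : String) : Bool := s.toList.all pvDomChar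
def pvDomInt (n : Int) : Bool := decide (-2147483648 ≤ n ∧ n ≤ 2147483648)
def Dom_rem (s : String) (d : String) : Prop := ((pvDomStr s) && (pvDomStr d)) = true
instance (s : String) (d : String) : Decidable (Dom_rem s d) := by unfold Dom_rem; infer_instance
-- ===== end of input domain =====

-- B replaces A's per-d-char find-and-slice loop (O(|d|·|s|)) by a counter of d and one
-- deletion pass over s (O(|s|+|d|)); return values agree on all inputs.

-- ===== PORT A =====
-- A: for each c in d, find its leftmost occurrence in s and slice it out; None if absent.
def rem_loop (cs : List Char) (dcs : List Char) : Option (List Char) :=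
  match dcs with
  | [] => some cs
  | c :: rest =>
    let i := PySem.Chars.find cs [c]
    if 0 ≤ i then
      rem_loop (PySem.List.slice cs none (some i) ++ PySem.List.slice cs (some (i + 1)) none) rest
    else none

def rem (s : String) (d : String) : Option String :=
  (rem_loop s.toList d.toList).map String.ofList

-- ===== PORT B =====
-- need = {}; for c in d: need[c] = need.get(c, 0) + 1
def rem_alt_need (dcs : List Char) : PySem.Dict Char Int :=
  dcs.foldl (fun nd c => nd.insert c (nd.getD c 0 + 1)) PySem.Dict.empty

-- for ch in s: if need.get(ch,0) > 0: need[ch] = need[ch] - 1 else: out.append(ch)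
def rem_alt_pass (cs : List Char) (nd : PySem.Dict Char Int) (out : List Char) :
    PySem.Dict Char Int × List Char :=
  match cs with
  | [] => (nd, out)
  | ch :: t =>
    if nd.getD ch 0 > 0 then rem_alt_pass t (nd.insert ch (nd.getD ch 0 - 1)) out
    else rem_alt_pass t nd (out ++ [ch])

def rem_alt (s : String) (d : String) : Option String :=
  let r := rem_alt_pass s.toList (rem_alt_need d.toList) []
  if r.1.values.any (fun v => decide (v > 0)) then none
  else some (String.ofList r.2)

-- ===== PRECONDITION & SPEC =====
def Spec_rem (s : String) (d : String) (out : Option String) : Prop := out = rem_alt s d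
instance (s : String) (d : String) (out : Option String) : Decidable (Spec_rem s d out) := by unfold Spec_rem; infer_instance

-- ===== CLAIM (what is proved, stated in full; the proofs are below) =====
def Claim_equal_rem : Prop := ∀ (s : String) (d : String), Dom_rem s d → Spec_rem s d (rem s d)

-- ===== LEMMAS AND PROOFS =====

-- Pure model of B's deletion pass: the counter as a function Char → Int.
def passF (cs : List Char) (f : Char → Int) (out : List Char) : (Char → Int) × List Char :=
  match cs with
  | [] => (f, out)
  | ch :: t =>
    if 0 < f ch then passF t (fun x => if x = ch then f x - 1 else f x) out
    else passF t f (out ++ [ch])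

-- s.find(c) for a single character: first index, -1 if absent.
lemma findgo_singleton (c : Char) (cs : List Char) (k : Nat) :
    PySem.Chars.find.go [c] cs k =
      if c ∈ cs then (((k + cs.idxOf c : Nat) : Int)) else -1 := by
  induction cs generalizing k with
  | nil => simp [PySem.Chars.find.go]
  | cons h t ih =>
    rw [PySem.Chars.find.go]
    by_cases hc : c = h
    · subst hc
      simp [List.isPrefixOf, List.idxOf_cons_self]
    · have hpre : List.isPrefixOf [c] (h :: t) = false := by
        simp [List.isPrefixOf]; exact fun hch => (hc hch).elim
      simp only [hpre, Bool.false_eq_true, if_false, ih]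
      by_cases hm : c ∈ t
      · rw [if_pos hm, if_pos (List.mem_cons_of_mem _ hm),
          List.idxOf_cons_ne t (by simpa using fun e => hc e.symm)]
        omega
      · rw [if_neg hm, if_neg (by simp [hm]; exact fun e => hc e)]

lemma find_singleton (c : Char) (cs : List Char) :
    PySem.Chars.find cs [c] = if c ∈ cs then ((cs.idxOf c : Nat) : Int) else -1 := by
  show PySem.Chars.find.go [c] cs 0 = _
  rw [findgo_singleton]; simp

-- getD 0 of a dict with no entry for c.
lemma getD_of_not_mem_keys (nd : PySem.Dict Char Int) (c : Char) (h : c ∉ nd.keys) :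
    nd.getD c 0 = 0 := by
  have : nd.items.find? (fun p => p.1 == c) = none := by
    rw [List.find?_eq_none]
    intro p hp
    simp only [beq_iff_eq]
    intro hpc
    exact h (hpc ▸ (by rw [PySem.Dict.keys]; exact List.mem_map_of_mem hp))
  simp [PySem.Dict.getD, PySem.Dict.get?, this]

-- the dict pass computes the model pass
lemma pass_sim (cs : List Char) (nd : PySem.Dict Char Int) (out : List Char)
    (h : nd.keys.Nodup) :
    (rem_alt_pass cs nd out).2 = (passF cs (fun c => nd.getD c 0) out).2
    ∧ (∀ c, (rem_alt_pass cs nd out).1.getD c 0 = (passF cs (fun c => nd.getD c 0) out).1 c)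
    ∧ (rem_alt_pass cs nd out).1.keys.Nodup := by
  induction cs generalizing nd out with
  | nil => exact ⟨rfl, fun c => rfl, h⟩
  | cons ch t ih =>
    rw [rem_alt_pass, passF]
    by_cases hc : 0 < nd.getD ch 0
    · have hnd' : ((nd.insert ch (nd.getD ch 0 - 1)).keys).Nodup := by
        have := PySem.Dict.nodup_keys_foldl_insert [ch] (fun d x => d.getD x 0 - 1) nd h
        simpa using this
      have hfun : (fun c => (nd.insert ch (nd.getD ch 0 - 1)).getD c 0)
          = (fun x => if x = ch then nd.getD x 0 - 1 else nd.getD x 0) := by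
        funext x
        rw [PySem.Dict.getD_insert]
        by_cases hx : x = ch <;> simp [hx]
      simp only [gt_iff_lt, if_pos hc]
      have := ih (nd.insert ch (nd.getD ch 0 - 1)) out hnd'
      rw [hfun] at this
      exact this
    · simp only [gt_iff_lt, if_neg hc]
      exact ih nd (out ++ [ch]) h

lemma need_count (dcs : List Char) (c : Char) :
    (rem_alt_need dcs).getD c 0 = (dcs.count c : Int) := by
  have := PySem.Dict.getD_foldl_insert_add_one dcs PySem.Dict.empty c
  unfold rem_alt_need
  rw [this]
  simp [PySem.Dict.getD, PySem.Dict.get?, PySem.Dict.empty]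

lemma need_nodup (dcs : List Char) : (rem_alt_need dcs).keys.Nodup := by
  unfold rem_alt_need
  exact PySem.Dict.nodup_keys_foldl_insert dcs _ PySem.Dict.empty (by simp [PySem.Dict.empty, PySem.Dict.keys])

-- values.any (· > 0) as an existence statement about lookups
lemma values_any_iff (nd : PySem.Dict Char Int) (h : nd.keys.Nodup) :
    nd.values.any (fun v => decide (v > 0)) = true ↔ ∃ c, 0 < nd.getD c 0 := by
  rw [PySem.Dict.values_eq_map_keys nd h 0]
  simp only [List.any_map, List.any_eq_true, Function.comp, decide_eq_true_eq, gt_iff_lt]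
  constructor
  · rintro ⟨k, _, hk⟩; exact ⟨k, hk⟩
  · rintro ⟨c, hc⟩
    by_cases hm : c ∈ nd.keys
    · exact ⟨c, hm, hc⟩
    · rw [getD_of_not_mem_keys nd c hm] at hc; omega

-- model-pass facts
lemma passF_untouched (cs : List Char) (f : Char → Int) (out : List Char) (c : Char)
    (h : c ∉ cs) : (passF cs f out).1 c = f c := by
  induction cs generalizing f out with
  | nil => rfl
  | cons ch t ih =>
    rw [passF]
    have hc : c ≠ ch := by intro e; exact h (e ▸ List.mem_cons_self ..)
    by_cases h0 : 0 < f ch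
    · rw [if_pos h0, ih _ _ (fun hm => h (List.mem_cons_of_mem _ hm))]
      simp [hc]
    · rw [if_neg h0]; exact ih _ _ (fun hm => h (List.mem_cons_of_mem _ hm))

lemma passF_le (cs : List Char) (f : Char → Int) (out : List Char) (x : Char) :
    (passF cs f out).1 x ≤ f x := by
  induction cs generalizing f out with
  | nil => exact le_refl _
  | cons ch t ih =>
    rw [passF]
    by_cases h0 : 0 < f ch
    · rw [if_pos h0]
      refine le_trans (ih _ out) ?_
      by_cases hx : x = ch
      · simp [hx]
      · simp [hx]
    · rw [if_neg h0]; exact ih f _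

lemma passF_done (cs : List Char) (f : Char → Int) (out : List Char)
    (h : ∀ x, f x ≤ 0) : passF cs f out = (f, out ++ cs) := by
  induction cs generalizing out with
  | nil => simp [passF]
  | cons ch t ih =>
    rw [passF, if_neg (by have := h ch; omega)]
    rw [ih]; simp

-- skipping the bumped char: one pass with count+1 at c equals the pass over s minus its first c
lemma passF_bump (c : Char) (cs : List Char) (f : Char → Int) (out : List Char)
    (hf : ∀ x, 0 ≤ f x) (hm : c ∈ cs) :
    passF cs (fun x => if x = c then f x + 1 else f x) out
      = passF (cs.eraseIdx (cs.idxOf c)) f out := by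
  induction cs generalizing f out with
  | nil => cases hm
  | cons h t ih =>
    by_cases hc : h = c
    · subst hc
      rw [List.idxOf_cons_self]
      show passF (h :: t) _ out = passF t f out
      rw [passF, if_pos (by simp; have := hf h; omega)]
      congr 1
      funext x
      by_cases hx : x = h <;> simp [hx]
    · have hmt : c ∈ t := by cases hm with | head => exact (hc rfl).elim | tail _ h => exact h
      rw [List.idxOf_cons_ne t (by simpa using hc)]
      show passF (h :: t) _ out = passF (h :: t.eraseIdx (t.idxOf c)) f out
      rw [passF, passF]
      have hch : c ≠ h := fun e => hc e.symm
      have hh : (if h = c then f h + 1 else f h) = f h := by simp [hc]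
      rw [hh]
      by_cases h0 : 0 < f h
      · rw [if_pos h0, if_pos h0]
        have hfun : (fun x => if x = h then (if x = c then f x + 1 else f x) - 1
              else (if x = c then f x + 1 else f x))
            = (fun x => if x = c then (fun y => if y = h then f y - 1 else f y) x + 1
              else (fun y => if y = h then f y - 1 else f y) x) := by
          funext x
          by_cases hx : x = h
          · subst hx; simp [hc]
          · by_cases hxc : x = c <;> simp [hx, hxc, hch]
        rw [hfun, ih (fun y => if y = h then f y - 1 else f y) out
          (fun y => by by_cases hy : y = h
                       · simp [hy]; omega
                       · simp [hy]; exact hf y) hmt]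
      · rw [if_neg h0, if_neg h0]
        exact ih f (out ++ [h]) hf hmt

-- count of d as a function, cons step
lemma count_cons_fun (c : Char) (rest : List Char) :
    (fun x => (((c :: rest).count x : Nat) : Int))
      = (fun x => if x = c then ((rest.count x : Nat) : Int) + 1 else ((rest.count x : Nat) : Int)) := by
  funext x
  by_cases hx : x = c
  · simp [hx]
  · have hcx : ¬ c = x := fun e => hx e.symm
    simp [hx, hcx]

-- A's loop against the model, both outcomes
lemma rem_loop_some (dcs : List Char) : ∀ cs : List Char,
    (∀ x, (passF cs (fun c => ((dcs.count c : Nat) : Int)) []).1 x ≤ 0) →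
    rem_loop cs dcs = some ((passF cs (fun c => ((dcs.count c : Nat) : Int)) []).2) := by
  induction dcs with
  | nil =>
    intro cs _
    rw [passF_done cs _ [] (by intro x; simp)]
    simp [rem_loop]
  | cons c rest ih =>
    intro cs hle
    have hm : c ∈ cs := by
      by_contra hni
      have := passF_untouched cs (fun x => (((c :: rest).count x : Nat) : Int)) [] c hni
      have h2 := hle c
      rw [this] at h2
      simp only [List.count_cons_self] at h2
      omega
    rw [rem_loop]
    simp only [find_singleton, hm, if_pos]
    have hidx : cs.idxOf c < cs.length := List.idxOf_lt_length_iff.mpr hm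
    rw [if_pos (by positivity)]
    have hslice : PySem.List.slice cs none (some ((cs.idxOf c : Nat) : Int))
        ++ PySem.List.slice cs (some (((cs.idxOf c : Nat) : Int) + 1)) none
        = cs.eraseIdx (cs.idxOf c) := by
      rw [PySem.List.slice_to_natCast]
      have : ((cs.idxOf c : Nat) : Int) + 1 = ((cs.idxOf c + 1 : Nat) : Int) := by push_cast; ring
      rw [this, PySem.List.slice_from_natCast]
      exact List.eraseIdx_eq_take_drop_succ cs _ ▸ rfl
    rw [hslice]
    have hb : passF cs (fun x => (((c :: rest).count x : Nat) : Int)) []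
        = passF (cs.eraseIdx (cs.idxOf c)) (fun x => ((rest.count x : Nat) : Int)) [] := by
      rw [count_cons_fun]
      exact passF_bump c cs _ [] (fun x => by positivity) hm
    rw [hb] at hle ⊢
    exact ih _ hle
  
lemma rem_loop_none (dcs : List Char) : ∀ (cs : List Char) (x : Char),
    0 < (passF cs (fun c => ((dcs.count c : Nat) : Int)) []).1 x →
    rem_loop cs dcs = none := by
  induction dcs with
  | nil =>
    intro cs x hx
    have hz : (fun c : Char => ((List.count c ([] : List Char) : Nat) : Int)) = (fun _ => (0 : Int)) := by
      funext y; simp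
    rw [hz] at hx
    have := passF_le cs (fun _ => (0 : Int)) [] x
    omega
  | cons c rest ih =>
    intro cs x hx
    by_cases hm : c ∈ cs
    · rw [rem_loop]
      simp only [find_singleton, hm, if_pos]
      rw [if_pos (by positivity)]
      have hslice : PySem.List.slice cs none (some ((cs.idxOf c : Nat) : Int))
          ++ PySem.List.slice cs (some (((cs.idxOf c : Nat) : Int) + 1)) none
          = cs.eraseIdx (cs.idxOf c) := by
        rw [PySem.List.slice_to_natCast]
        have : ((cs.idxOf c : Nat) : Int) + 1 = ((cs.idxOf c + 1 : Nat) : Int) := by push_cast; ring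
        rw [this, PySem.List.slice_from_natCast]
        exact List.eraseIdx_eq_take_drop_succ cs _ ▸ rfl
      rw [hslice]
      have hb : passF cs (fun y => (((c :: rest).count y : Nat) : Int)) []
          = passF (cs.eraseIdx (cs.idxOf c)) (fun y => ((rest.count y : Nat) : Int)) [] := by
        rw [count_cons_fun]
        exact passF_bump c cs _ [] (fun y => by positivity) hm
      rw [hb] at hx
      exact ih _ x hx
    · rw [rem_loop]
      simp [find_singleton, hm]

-- ===== VERDICT (by name: the statement is the Claim_ definition above) =====
theorem rem_spec : Claim_equal_rem := by
  unfold Claim_equal_rem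
  intro s d _
  unfold Spec_rem rem rem_alt
  have hneed := need_nodup d.toList
  obtain ⟨hout, hgd, hnd⟩ := pass_sim s.toList (rem_alt_need d.toList) [] hneed
  have hcnt : (fun c => (rem_alt_need d.toList).getD c 0)
      = (fun c => ((d.toList.count c : Nat) : Int)) := by
    funext c; exact need_count d.toList c
  rw [hcnt] at hout hgd
  set r := rem_alt_pass s.toList (rem_alt_need d.toList) [] with hr
  by_cases hb : r.1.values.any (fun v => decide (v > 0)) = true
  · simp only [hb, if_true]
    obtain ⟨c, hc⟩ := (values_any_iff r.1 hnd).mp hb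
    rw [hgd c] at hc
    rw [rem_loop_none d.toList s.toList c hc]
    rfl
  · rw [if_neg hb]
    have hall : ∀ x, (passF s.toList (fun c => ((d.toList.count c : Nat) : Int)) []).1 x ≤ 0 := by
      intro x
      by_contra hpos
      exact hb ((values_any_iff r.1 hnd).mpr ⟨x, by rw [hgd x]; omega⟩)
    rw [rem_loop_some d.toList s.toList hall]
    simp [hout]
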